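-- pv_equiv track=rewrite | github.com/semgenomsk/Python_Ceminare | HW_6/task_1.py | find
-- ===== SOURCE A (Python) =====
-- def find(exp, sech_operand):
--     index_start = 0
--     index_finished = 0
--     index_operand = 0
--     operands_full = ['*', '/', '-', '+']
--     operands = ['*', '/', '-', '+']
--     for op in sech_operand:
--         operands.remove(op)
--     found = False
--     for i, sym in enumerate(exp):
--         if i == 0 and sym == '-':
--             continue
--         if not found and sym in operands:
--             index_start = i+1
--         elif found and sym in operands_full:
--             index_finished = i-1
--             return index_start, index_finished, index_operand
--         elif sym in sech_operand:
--             found = True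
--             index_operand = index_finished = len(exp)-1
--     return index_start, index_finished, index_operand
-- ===== SOURCE B (Python) =====
-- def find(exp, sech_operand):
--     n = len(exp)
--     full = ['*', '/', '-', '+']
--     seps = ['*', '/', '-', '+']
--     for op in sech_operand:
--         seps.remove(op)
--
--     def skip(i):
--         return i == 0 and exp[i] == '-'
--
--     # 1. pivot: first searched-operand symbol (a leading '-' is never the pivot)
--     p = n
--     for i in range(n):
--         if not skip(i) and exp[i] in sech_operand:
--             p = i
--             break
--
--     # 2. start: just after the last separator operator left of the pivot
--     index_start = 0
--     for i in range(p):
--         if not skip(i) and exp[i] in seps: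
--             index_start = i + 1
--
--     if p == n:
--         return index_start, 0, 0
--
--     # 3. finish: just before the first operator right of the pivot
--     for i in range(p + 1, n):
--         if exp[i] in full:
--             return index_start, i - 1, n - 1
--     return index_start, n - 1, n - 1
-- ===== Notes on version B (the rewrite author's own statement) =====
-- stated objective: simpler
-- what changed: A's single stateful pass with a 'found' flag and mid-loop return is replaced by three independent plain scans: find the pivot, scan the prefix for the last separator, scan the suffix for the first operator.
import Mathlib
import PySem

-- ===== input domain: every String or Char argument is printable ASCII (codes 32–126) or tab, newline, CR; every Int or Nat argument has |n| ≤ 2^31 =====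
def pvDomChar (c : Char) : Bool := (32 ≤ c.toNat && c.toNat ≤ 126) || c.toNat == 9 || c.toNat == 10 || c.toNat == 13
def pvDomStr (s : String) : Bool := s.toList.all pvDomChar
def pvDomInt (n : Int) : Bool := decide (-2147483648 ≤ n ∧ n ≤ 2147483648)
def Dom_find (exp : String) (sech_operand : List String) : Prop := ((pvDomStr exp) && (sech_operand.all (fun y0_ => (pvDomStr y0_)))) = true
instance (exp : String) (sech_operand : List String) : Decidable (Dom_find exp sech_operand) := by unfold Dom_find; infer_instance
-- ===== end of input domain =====

-- B replaces A's single stateful pass (found-flag + mid-loop return) by three independent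
-- plain scans (pivot, last separator left of it, first operator right of it); same cost, simpler.

-- ===== PORT A =====
def pvFull : List String := ["*", "/", "-", "+"]

-- operands = ['*','/','-','+'] ; for op in sech_operand: operands.remove(op)   (none = ValueError)
def pvRemoveFold (sech : List String) : Option (List String) :=
  sech.foldl (fun acc op => acc.bind (fun l => PySem.List.remove? l op)) (some pvFull)

-- the 'for i, sym in enumerate(exp)' loop of A, state (index_start, index_finished, index_operand, found)
def findLoopA (sech operands : List String) (n : Int) :
    List Char → Nat → Int → Int → Int → Bool → Int × Int × Int
  | [], _, st, fin, opd, _ => (st, fin, opd)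
  | c :: rest, i, st, fin, opd, found =>
    if i = 0 ∧ c = '-' then
      findLoopA sech operands n rest (i+1) st fin opd found
    else if ¬found ∧ String.ofList [c] ∈ operands then
      findLoopA sech operands n rest (i+1) ((i : Int) + 1) fin opd found
    else if found ∧ String.ofList [c] ∈ pvFull then
      (st, (i : Int) - 1, opd)
    else if String.ofList [c] ∈ sech then
      findLoopA sech operands n rest (i+1) st (n-1) (n-1) true
    else
      findLoopA sech operands n rest (i+1) st fin opd found

def find (exp : String) (sech_operand : List String) : Int × Int × Int :=
  match pvRemoveFold sech_operand with
  | none => (0, 0, 0)  -- Python raises ValueError here; excluded by Pre_find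
  | some operands =>
    findLoopA sech_operand operands (exp.toList.length : Int) exp.toList 0 0 0 0 false

-- ===== PORT B =====
-- pivot scan: first i with exp[i] in sech_operand, skipping a leading '-'
def pvPivotScan (sech : List String) : List Char → Nat → Option Nat
  | [], _ => none
  | c :: rest, i =>
    if ¬(i = 0 ∧ c = '-') ∧ String.ofList [c] ∈ sech then some i
    else pvPivotScan sech rest (i+1)

-- start scan: index_start over 'for i in range(p)'
def pvStartScan (seps : List String) (p : Nat) : List Char → Nat → Int → Int
  | [], _, acc => acc
  | c :: rest, i, acc =>
    if i < p ∧ ¬(i = 0 ∧ c = '-') ∧ String.ofList [c] ∈ seps then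
      pvStartScan seps p rest (i+1) ((i : Int) + 1)
    else
      pvStartScan seps p rest (i+1) acc

-- finish scan: 'for i in range(p+1, n)', first operator symbol
def pvEndScan (st n : Int) : List Char → Nat → Int × Int × Int
  | [], _ => (st, n - 1, n - 1)
  | c :: rest, i =>
    if String.ofList [c] ∈ pvFull then (st, (i : Int) - 1, n - 1)
    else pvEndScan st n rest (i+1)

def find_alt (exp : String) (sech_operand : List String) : Int × Int × Int :=
  match pvRemoveFold sech_operand with
  | none => (0, 0, 0)  -- Python raises ValueError here (seps.remove), as A does; excluded by Pre_find
  | some seps =>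
    let cs := exp.toList
    let n := cs.length
    let p := (pvPivotScan sech_operand cs 0).getD n
    let st := pvStartScan seps p cs 0 0
    if p = n then (st, 0, 0)
    else pvEndScan st (n : Int) (cs.drop (p+1)) (p+1)

-- ===== PRECONDITION & SPEC =====
-- Pre_find excludes exactly the inputs on which both Pythons raise ValueError: list.remove
-- fails when sech_operand has a duplicate or an element not among '*', '/', '-', '+'.
def Pre_find (exp : String) (sech_operand : List String) : Prop :=
  sech_operand.Nodup ∧ ∀ s ∈ sech_operand, s ∈ (["*", "/", "-", "+"] : List String)
instance (exp : String) (sech_operand : List String) : Decidable (Pre_find exp sech_operand) := by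
  unfold Pre_find; infer_instance

def pvWitness_find : String × List String := ("12-3*45+6", ["*"])

def Spec_find (exp : String) (sech_operand : List String) (out : Int × Int × Int) : Prop := out = find_alt exp sech_operand
instance (exp : String) (sech_operand : List String) (out : Int × Int × Int) : Decidable (Spec_find exp sech_operand out) := by unfold Spec_find; infer_instance

-- ===== CLAIM (what is proved, stated in full; the proofs are below) =====
def Claim_equal_find : Prop := ∀ (exp : String) (sech_operand : List String), Dom_find exp sech_operand → Pre_find exp sech_operand → Spec_find exp sech_operand (find exp sech_operand)

-- ===== LEMMAS AND PROOFS =====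

-- the remove-fold succeeds under Pre and its result is membership-wise pvFull minus sech
theorem removeFold_go {S l0 : List String} (hS : S.Nodup) (hsub : ∀ s ∈ S, s ∈ l0)
    (hl0 : l0.Nodup) :
    ∃ l, S.foldl (fun acc op => acc.bind (fun l => PySem.List.remove? l op)) (some l0) = some l ∧
      l.Nodup ∧ ∀ s : String, s ∈ l ↔ s ∈ l0 ∧ s ∉ S := by
  induction S generalizing l0 with
  | nil => exact ⟨l0, rfl, hl0, by simp⟩
  | cons op S' ih =>
    have hop : op ∈ l0 := hsub op (by simp)
    have hrem : PySem.List.remove? l0 op = some (l0.erase op) :=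
      PySem.List.remove?_eq_some_erase l0 op hop
    have hS' : S'.Nodup := hS.of_cons
    have hsub' : ∀ s ∈ S', s ∈ l0.erase op := by
      intro s hs
      have hne : s ≠ op := by
        intro h; subst h; exact (List.nodup_cons.mp hS).1 hs
      exact (List.mem_erase_of_ne hne).mpr (hsub s (by simp [hs]))
    obtain ⟨l, hfold, hnd, hmem⟩ := ih hS' hsub' (hl0.erase op)
    refine ⟨l, ?_, hnd, ?_⟩
    · simpa [hrem] using hfold
    · intro s
      rw [hmem s, List.Nodup.mem_erase_iff hl0]
      constructor
      · rintro ⟨⟨hne, hs⟩, hns⟩; exact ⟨hs, by simp [hne, hns]⟩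
      · rintro ⟨hs, hns⟩
        simp only [List.mem_cons, not_or] at hns
        exact ⟨⟨hns.1, hs⟩, hns.2⟩

-- found-phase of A's loop = B's finish scan
theorem loopA_found (sech operands : List String) (n : Int)
    (hsub : ∀ s ∈ sech, s ∈ pvFull) :
    ∀ (cs : List Char) (i : Nat) (st : Int), i ≠ 0 →
      findLoopA sech operands n cs i st (n-1) (n-1) true = pvEndScan st n cs i := by
  intro cs
  induction cs with
  | nil => intro i st _; rfl
  | cons c rest ih =>
    intro i st hi
    by_cases hf : String.ofList [c] ∈ pvFull
    · have hL : findLoopA sech operands n (c :: rest) i st (n-1) (n-1) true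
          = (st, (i : Int) - 1, n-1) := by
        simp only [findLoopA]
        rw [if_neg (by tauto), if_neg (by simp), if_pos ⟨by trivial, hf⟩]
      rw [hL]
      simp only [pvEndScan]
      rw [if_pos hf]
    · have hs : String.ofList [c] ∉ sech := fun h => hf (hsub _ h)
      have hL : findLoopA sech operands n (c :: rest) i st (n-1) (n-1) true
          = findLoopA sech operands n rest (i+1) st (n-1) (n-1) true := by
        simp only [findLoopA]
        rw [if_neg (by tauto), if_neg (by simp), if_neg (by simp [hf]), if_neg hs]
      rw [hL, ih (i+1) st (by omega)]
      simp only [pvEndScan]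
      rw [if_neg hf]

theorem startScan_const (seps : List String) (p : Nat) :
    ∀ (cs : List Char) (i : Nat) (acc : Int), p ≤ i → pvStartScan seps p cs i acc = acc := by
  intro cs
  induction cs with
  | nil => intro i acc _; rfl
  | cons c rest ih =>
    intro i acc hp
    simp only [pvStartScan]
    rw [if_neg (fun h => absurd h.1 (by omega))]
    exact ih (i+1) acc (by omega)

theorem pivotScan_bounds (sech : List String) :
    ∀ (cs : List Char) (i p : Nat), pvPivotScan sech cs i = some p → i ≤ p ∧ p < i + cs.length := by
  intro cs
  induction cs with
  | nil => intro i p h; simp [pvPivotScan] at h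
  | cons c rest ih =>
    intro i p h
    simp only [pvPivotScan] at h
    split_ifs at h with hc
    · cases h; constructor <;> simp
    · have := ih (i+1) p h
      simp only [List.length_cons]
      omega

-- not-found-phase of A's loop = B's pivot/start/finish scans
theorem loopA_notfound (sech operands seps : List String) (n : Int)
    (hsub : ∀ s ∈ sech, s ∈ pvFull)
    (hops : ∀ s : String, s ∈ operands ↔ s ∈ pvFull ∧ s ∉ sech)
    (hseps : ∀ s : String, s ∈ seps ↔ s ∈ pvFull ∧ s ∉ sech) :
    ∀ (cs : List Char) (i : Nat) (st : Int), i ≠ 0 →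
      findLoopA sech operands n cs i st 0 0 false =
        match pvPivotScan sech cs i with
        | none => (pvStartScan seps (i + cs.length) cs i st, 0, 0)
        | some p => pvEndScan (pvStartScan seps p cs i st) n (cs.drop (p + 1 - i)) (p + 1) := by
  intro cs
  induction cs with
  | nil => intro i st _; rfl
  | cons c rest ih =>
    intro i st hi
    by_cases hpiv : String.ofList [c] ∈ sech
    · -- pivot found at i
      have hnop : String.ofList [c] ∉ operands := fun h => ((hops _).mp h).2 hpiv
      have hL : findLoopA sech operands n (c :: rest) i st 0 0 false
          = findLoopA sech operands n rest (i+1) st (n-1) (n-1) true := by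
        simp only [findLoopA]
        rw [if_neg (by tauto), if_neg (fun h => hnop h.2), if_neg (by simp), if_pos hpiv]
      have hps : pvPivotScan sech (c :: rest) i = some i := by
        simp only [pvPivotScan]
        rw [if_pos ⟨by tauto, hpiv⟩]
      have hst : pvStartScan seps i (c :: rest) i st = st := by
        simp only [pvStartScan]
        rw [if_neg (fun h => absurd h.1 (by omega))]
        exact startScan_const seps i rest (i+1) st (by omega)
      rw [hL, loopA_found sech operands n hsub rest (i+1) st (by omega), hps]
      simp only [hst]
      have h1 : i + 1 - i = 1 := by omega
      simp [h1]
    · by_cases hop : String.ofList [c] ∈ operands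
      · -- separator symbol at i
        have hsep : String.ofList [c] ∈ seps := (hseps _).mpr ((hops _).mp hop)
        have hL : findLoopA sech operands n (c :: rest) i st 0 0 false
            = findLoopA sech operands n rest (i+1) ((i : Int) + 1) 0 0 false := by
          simp only [findLoopA]
          rw [if_neg (by tauto), if_pos ⟨by simp, hop⟩]
        have hps : pvPivotScan sech (c :: rest) i = pvPivotScan sech rest (i+1) := by
          simp only [pvPivotScan]
          rw [if_neg (fun h => hpiv h.2)]
        rw [hL, ih (i+1) ((i : Int) + 1) (by omega), hps]
        cases hps' : pvPivotScan sech rest (i+1) with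
        | none =>
          have hst : pvStartScan seps (i + (c :: rest).length) (c :: rest) i st
              = pvStartScan seps ((i+1) + rest.length) rest (i+1) ((i : Int) + 1) := by
            have harith : i + (c :: rest).length = (i + 1) + rest.length := by
              simp only [List.length_cons]; omega
            rw [harith]
            simp only [pvStartScan]
            rw [if_pos ⟨by omega, by tauto, hsep⟩]
          simp only [hst]
        | some p =>
          have hb := pivotScan_bounds sech rest (i+1) p hps'
          have hst : pvStartScan seps p (c :: rest) i st
              = pvStartScan seps p rest (i+1) ((i : Int) + 1) := by
            simp only [pvStartScan]
            rw [if_pos ⟨by omega, by tauto, hsep⟩]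
          have hdrop : (c :: rest).drop (p + 1 - i) = rest.drop (p + 1 - (i+1)) := by
            have h1 : p + 1 - i = (p + 1 - (i+1)) + 1 := by omega
            rw [h1, List.drop_succ_cons]
          simp only [hst, hdrop]
      · -- plain symbol at i
        have hnsep : String.ofList [c] ∉ seps := fun h =>
          hop ((hops _).mpr ((hseps _).mp h))
        have hL : findLoopA sech operands n (c :: rest) i st 0 0 false
            = findLoopA sech operands n rest (i+1) st 0 0 false := by
          simp only [findLoopA]
          rw [if_neg (by tauto), if_neg (fun h => hop h.2), if_neg (by simp), if_neg hpiv]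
        have hps : pvPivotScan sech (c :: rest) i = pvPivotScan sech rest (i+1) := by
          simp only [pvPivotScan]
          rw [if_neg (fun h => hpiv h.2)]
        rw [hL, ih (i+1) st (by omega), hps]
        cases hps' : pvPivotScan sech rest (i+1) with
        | none =>
          have hst : pvStartScan seps (i + (c :: rest).length) (c :: rest) i st
              = pvStartScan seps ((i+1) + rest.length) rest (i+1) st := by
            have harith : i + (c :: rest).length = (i + 1) + rest.length := by
              simp only [List.length_cons]; omega
            rw [harith]
            simp only [pvStartScan]
            rw [if_neg (fun h => hnsep h.2.2)]
          simp only [hst]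
        | some p =>
          have hst : pvStartScan seps p (c :: rest) i st
              = pvStartScan seps p rest (i+1) st := by
            simp only [pvStartScan]
            rw [if_neg (fun h => hnsep h.2.2)]
          have hdrop : (c :: rest).drop (p + 1 - i) = rest.drop (p + 1 - (i+1)) := by
            have hb := pivotScan_bounds sech rest (i+1) p hps'
            have h1 : p + 1 - i = (p + 1 - (i+1)) + 1 := by omega
            rw [h1, List.drop_succ_cons]
          simp only [hst, hdrop]

-- ===== VERDICT (by name: the statement is the Claim_ definition above) =====
theorem find_spec : Claim_equal_find := by
  intro exp sech _ hpre
  obtain ⟨hnd, hsub⟩ := hpre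
  replace hsub : ∀ s ∈ sech, s ∈ pvFull := hsub
  obtain ⟨l, hfold, _, hmem⟩ := removeFold_go hnd hsub (by decide)
  unfold Spec_find find find_alt pvRemoveFold
  rw [hfold]
  dsimp only
  generalize exp.toList = cs
  cases cs with
  | nil => simp [findLoopA, pvPivotScan, pvStartScan]
  | cons c rest =>
    have key : ∀ (st : Int),
        findLoopA sech l ((c :: rest).length : Int) rest 1 st 0 0 false =
          match pvPivotScan sech rest 1 with
          | none => (pvStartScan l ((c :: rest).length) rest 1 st, 0, 0)
          | some p => pvEndScan (pvStartScan l p rest 1 st) ((c :: rest).length : Int)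
              ((c :: rest).drop (p+1)) (p+1) := by
      intro st
      rw [loopA_notfound sech l l ((c :: rest).length : Int) hsub hmem hmem rest 1 st
        (by omega)]
      cases hp : pvPivotScan sech rest 1 with
      | none =>
        have : 1 + rest.length = (c :: rest).length := by simp [Nat.add_comm]
        simp only [this]
      | some p =>
        have : (c :: rest).drop (p + 1) = rest.drop (p + 1 - 1) := by simp
        simp only [this]
    by_cases hcm : c = '-'
    · -- leading '-' : skipped by both
      subst hcm
      have hL : findLoopA sech l (((('-') :: rest).length : Nat) : Int) ('-' :: rest) 0 0 0 0 false
          = findLoopA sech l ((('-') :: rest).length : Int) rest 1 0 0 0 false := by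
        simp only [findLoopA]
        rw [if_pos (by simp)]
      have hps : pvPivotScan sech ('-' :: rest) 0 = pvPivotScan sech rest 1 := by
        simp only [pvPivotScan]
        rw [if_neg (by simp)]
      rw [hL, key 0, hps]
      cases hp : pvPivotScan sech rest 1 with
      | none =>
        have hpn : (none : Option Nat).getD (('-' :: rest).length) = ('-' :: rest).length := rfl
        simp only [hpn]
        rw [if_pos trivial]
        have hst : pvStartScan l (('-' :: rest).length) ('-' :: rest) 0 0
            = pvStartScan l (('-' :: rest).length) rest 1 0 := by
          simp only [pvStartScan]
          rw [if_neg (by simp)]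
        simp only [hst]
      | some p =>
        have hb := pivotScan_bounds sech rest 1 p hp
        have hpn : (some p).getD (('-' :: rest).length) = p := rfl
        simp only [hpn]
        rw [if_neg (by simp only [List.length_cons]; omega)]
        have hst : pvStartScan l p ('-' :: rest) 0 0
            = pvStartScan l p rest 1 0 := by
          simp only [pvStartScan]
          rw [if_neg (by simp)]
        simp only [hst]
    · -- first symbol is not '-'
      by_cases hpiv : String.ofList [c] ∈ sech
      · -- pivot at position 0
        have hnop : String.ofList [c] ∉ l := fun h => ((hmem _).mp h).2 hpiv
        have hL : findLoopA sech l ((c :: rest).length : Int) (c :: rest) 0 0 0 0 false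
            = findLoopA sech l ((c :: rest).length : Int) rest 1 0
                (((c :: rest).length : Int) - 1) (((c :: rest).length : Int) - 1) true := by
          simp only [findLoopA]
          rw [if_neg (by tauto), if_neg (fun h => hnop h.2), if_neg (by simp), if_pos hpiv]
        have hps : pvPivotScan sech (c :: rest) 0 = some 0 := by
          simp only [pvPivotScan]
          rw [if_pos ⟨by tauto, hpiv⟩]
        rw [hL, loopA_found sech l ((c :: rest).length : Int) hsub rest 1 0 (by omega), hps]
        have hpn : (some 0).getD ((c :: rest).length) = 0 := rfl
        simp only [hpn]
        rw [if_neg (by simp)]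
        have hst : pvStartScan l 0 (c :: rest) 0 0 = 0 := by
          simp only [pvStartScan]
          rw [if_neg (fun h => absurd h.1 (by omega))]
          exact startScan_const l 0 rest 1 0 (by omega)
        simp only [hst]
        simp
      · by_cases hop : String.ofList [c] ∈ l
        · -- separator at position 0
          have hsep : String.ofList [c] ∈ l := (hmem _).mpr ((hmem _).mp hop)
          have hL : findLoopA sech l ((c :: rest).length : Int) (c :: rest) 0 0 0 0 false
              = findLoopA sech l ((c :: rest).length : Int) rest 1 ((0 : Int) + 1) 0 0 false := by
            simp only [findLoopA]
            rw [if_neg (by tauto), if_pos ⟨by simp, hop⟩]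
            norm_num
          have hps : pvPivotScan sech (c :: rest) 0 = pvPivotScan sech rest 1 := by
            simp only [pvPivotScan]
            rw [if_neg (fun h => hpiv h.2)]
          rw [hL, key ((0 : Int) + 1), hps]
          cases hp : pvPivotScan sech rest 1 with
          | none =>
            have hpn : (none : Option Nat).getD ((c :: rest).length) = (c :: rest).length := rfl
            simp only [hpn]
            rw [if_pos trivial]
            have hst : pvStartScan l ((c :: rest).length) (c :: rest) 0 0
                = pvStartScan l ((c :: rest).length) rest 1 ((0 : Int) + 1) := by
              simp only [pvStartScan]
              rw [if_pos ⟨by simp, by tauto, hsep⟩]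
              norm_num
            simp only [hst]
          | some p =>
            have hb := pivotScan_bounds sech rest 1 p hp
            have hpn : (some p).getD ((c :: rest).length) = p := rfl
            simp only [hpn]
            rw [if_neg (by simp only [List.length_cons]; omega)]
            have hst : pvStartScan l p (c :: rest) 0 0
                = pvStartScan l p rest 1 ((0 : Int) + 1) := by
              simp only [pvStartScan]
              rw [if_pos ⟨by omega, by tauto, hsep⟩]
              norm_num
            simp only [hst]
        · -- ordinary symbol at position 0
          have hnsep : String.ofList [c] ∉ l := fun h => hop ((hmem _).mpr ((hmem _).mp h))
          have hL : findLoopA sech l ((c :: rest).length : Int) (c :: rest) 0 0 0 0 false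
              = findLoopA sech l ((c :: rest).length : Int) rest 1 0 0 0 false := by
            simp only [findLoopA]
            rw [if_neg (by tauto), if_neg (fun h => hop h.2), if_neg (by simp), if_neg hpiv]
          have hps : pvPivotScan sech (c :: rest) 0 = pvPivotScan sech rest 1 := by
            simp only [pvPivotScan]
            rw [if_neg (fun h => hpiv h.2)]
          rw [hL, key 0, hps]
          cases hp : pvPivotScan sech rest 1 with
          | none =>
            have hpn : (none : Option Nat).getD ((c :: rest).length) = (c :: rest).length := rfl
            simp only [hpn]
            rw [if_pos trivial]
            have hst : pvStartScan l ((c :: rest).length) (c :: rest) 0 0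
                = pvStartScan l ((c :: rest).length) rest 1 0 := by
              simp only [pvStartScan]
              rw [if_neg (fun h => hnsep h.2.2)]
            simp only [hst]
          | some p =>
            have hb := pivotScan_bounds sech rest 1 p hp
            have hpn : (some p).getD ((c :: rest).length) = p := rfl
            simp only [hpn]
            rw [if_neg (by simp only [List.length_cons]; omega)]
            have hst : pvStartScan l p (c :: rest) 0 0
                = pvStartScan l p rest 1 0 := by
              simp only [pvStartScan]
              rw [if_neg (fun h => hnsep h.2.2)]
            simp only [hst]
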